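-- pv_equiv track=rewrite | github.com/marcbln/ai-code-comments | my-patch.py | find_hunk_position
-- ===== SOURCE A (Python) =====
-- from typing import List, Tuple
--
-- def find_hunk_position(content: List[str], context_before: List[str], context_after: List[str]) -> int:
--     """Find the position in content where the hunk should be applied."""
--     if not context_before and not context_after:
--         return -1
--
--     content_str = '\n'.join(content)
--     search_str = '\n'.join(context_before + context_after)
--
--     # Handle empty context cases
--     if not search_str:
--         return 0
--
--     # Find all possible matches
--     matches = []
--     start = 0
--     while True:
--         pos = content_str.find(search_str, start)
--         if pos == -1:
--             break
--         matches.append(pos)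
--         start = pos + 1
--
--     if len(matches) == 1:
--         # Count newlines to get line number
--         return content_str.count('\n', 0, matches[0]) + len(context_before)
--
--     return -1
-- ===== SOURCE B (Python) =====
-- from typing import List
--
-- def find_hunk_position(content: List[str], context_before: List[str], context_after: List[str]) -> int:
--     if not context_before and not context_after:
--         return -1
--     text = '\n'.join(content)
--     pat = '\n'.join(context_before + context_after)
--     if not pat:
--         return 0
--     m = len(pat)
--     active = []          # lengths of the pattern prefixes matched up to the current char
--     match_start = None   # start index of the unique occurrence seen so far
--     for t, c in enumerate(text):
--         nxt = [l + 1 for l in active if pat[l] == c]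
--         if pat[0] == c:
--             nxt.append(1)
--         if m in nxt:
--             if match_start is not None:
--                 return -1
--             match_start = t + 1 - m
--             nxt.remove(m)
--         active = nxt
--     if match_start is None:
--         return -1
--     return text[:match_start].count('\n') + len(context_before)
-- ===== Notes on version B (the rewrite author's own statement) =====
-- stated objective: alternative
-- what changed: A repeatedly calls str.find on the joined string to collect the list of ALL match positions and then inspects its length; B never slices or restarts a search: it makes ONE character-by-character pass over the text simulating the pattern-matching NFA (a list of currently-matched pattern-prefix lengths, advanced per character), records the start of the first completed match and returns -1 immediately when a second one completes.
import Mathlib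
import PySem

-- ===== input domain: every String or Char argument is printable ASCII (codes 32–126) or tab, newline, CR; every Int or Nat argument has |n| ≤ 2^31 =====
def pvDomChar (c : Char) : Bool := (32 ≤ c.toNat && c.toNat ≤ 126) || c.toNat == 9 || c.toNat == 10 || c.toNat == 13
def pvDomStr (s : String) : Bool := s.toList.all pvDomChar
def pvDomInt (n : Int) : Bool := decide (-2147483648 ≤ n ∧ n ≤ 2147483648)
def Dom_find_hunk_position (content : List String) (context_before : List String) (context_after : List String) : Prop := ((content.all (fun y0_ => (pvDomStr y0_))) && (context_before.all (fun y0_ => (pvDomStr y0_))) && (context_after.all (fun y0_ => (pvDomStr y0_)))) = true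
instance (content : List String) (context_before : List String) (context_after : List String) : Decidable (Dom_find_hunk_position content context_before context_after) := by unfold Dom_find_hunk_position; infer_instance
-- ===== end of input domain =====

-- B replaces A's repeated str.find over the joined string (collecting every match position)
-- with a single character-by-character pass that simulates the pattern-matching NFA: it carries
-- the list of currently-matched pattern-prefix lengths, records the start of the first completed
-- match and aborts with -1 as soon as a second one completes (objective: alternative).

-- ===== PORT A =====
-- termination fact for A's while-loop (cited by pvMatchesA's decreasing_by):
-- a successful find lies at or beyond `start`, and `start` is still inside the string
lemma pv_findFrom_bound (text pat : List Char) (k : Nat)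
    (h : PySem.Chars.findFrom text pat (k : Int) none ≠ -1) :
    k ≤ text.length ∧ (k : Int) ≤ PySem.Chars.findFrom text pat (k : Int) none := by
  by_cases hk : k ≤ text.length
  · exact ⟨hk, (PySem.Chars.findFrom_natCast_spec text pat k hk h).1⟩
  · exfalso
    apply h
    simp only [PySem.Chars.findFrom]
    split_ifs with h1 h2 <;> omega

-- the 'while True: pos = content_str.find(search_str, start); … ; start = pos + 1' loop of A
def pvMatchesA (text pat : List Char) (start : Nat) : List Int :=
  if h : PySem.Chars.findFrom text pat (start : Int) none = -1 then []
  else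
    (PySem.Chars.findFrom text pat (start : Int) none) ::
      pvMatchesA text pat ((PySem.Chars.findFrom text pat (start : Int) none).toNat + 1)
termination_by text.length + 1 - start
decreasing_by
  have hb := pv_findFrom_bound text pat start h
  omega

def find_hunk_position (content : List String) (context_before : List String) (context_after : List String) : Int :=
  if context_before = [] ∧ context_after = [] then -1
  else
    let text := (PySem.Str.join "\n" content).toList
    let pat := (PySem.Str.join "\n" (context_before ++ context_after)).toList
    if pat = [] then 0
    else
      let ms := pvMatchesA text pat 0
      if ms.length = 1 then
        -- content_str.count('\n', 0, matches[0]): exact as count over the slice [0:matches[0]];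
        -- ms.headD 0 is matches[0] (ms has length 1 here)
        ((PySem.Chars.count (PySem.List.slice text (some 0) (some (ms.headD 0))) ['\n'] : Int)
          + (context_before.length : Int))
      else -1

-- ===== PORT B =====
-- the 'for t, c in enumerate(text)' loop of B: `active` = lengths of the pattern prefixes matched
-- up to the current char, `found` = start of the unique occurrence seen so far ('match_start');
-- the early 'return -1' on a second completed match is the `none` result
def pvScanB (pat : List Char) : List Char → Nat → List Nat → Option Nat → Option Nat
  | [], _, _, found => found
  | c :: rest, t, active, found =>
    let nxt : List Nat := (active.filter (fun (l : Nat) => PySem.List.pyGet? pat (Int.ofNat l) == some c)).map (fun (l : Nat) => l + 1)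
      ++ (if PySem.List.pyGet? pat 0 == some c then [1] else [])
    if pat.length ∈ nxt then
      match found with
      | some _ => none
      | none => pvScanB pat rest (t + 1) (nxt.erase pat.length) (some (t + 1 - pat.length))
    else pvScanB pat rest (t + 1) nxt found

def find_hunk_position_alt (content : List String) (context_before : List String) (context_after : List String) : Int :=
  if context_before = [] ∧ context_after = [] then -1
  else
    let text := (PySem.Str.join "\n" content).toList
    let pat := (PySem.Str.join "\n" (context_before ++ context_after)).toList
    if pat = [] then 0
    else
      match pvScanB pat text 0 [] none with
      | none => -1
      | some j =>
        ((PySem.Chars.count (PySem.List.slice text none (some (j : Int))) ['\n'] : Int)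
          + (context_before.length : Int))

-- ===== PRECONDITION & SPEC =====
def Spec_find_hunk_position (content : List String) (context_before : List String) (context_after : List String) (out : Int) : Prop := out = find_hunk_position_alt content context_before context_after
instance (content : List String) (context_before : List String) (context_after : List String) (out : Int) : Decidable (Spec_find_hunk_position content context_before context_after out) := by unfold Spec_find_hunk_position; infer_instance

-- ===== CLAIM (what is proved, stated in full; the proofs are below) =====
def Claim_equal_find_hunk_position : Prop := ∀ (content : List String) (context_before : List String) (context_after : List String), Dom_find_hunk_position content context_before context_after → Spec_find_hunk_position content context_before context_after (find_hunk_position content context_before context_after)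

-- ===== LEMMAS AND PROOFS =====

-- `pat` occurs in `text` at position j
def pvHit (text pat : List Char) (j : Nat) : Bool := decide (pat <+: text.drop j)

-- all occurrences ending within the first t characters (listed in increasing order)
def pvHits (text pat : List Char) (t : Nat) : List Nat :=
  (List.range' 0 (t + 1 - pat.length)).filter (pvHit text pat)

-- the value B's scan must produce: the unique occurrence, else none
def pvFinal (text pat : List Char) : Option Nat :=
  match pvHits text pat text.length with
  | [j] => some j
  | _ => none

-- invariant of B's `active` list after t characters
def pvActiveInv (text pat : List Char) (active : List Nat) (t : Nat) : Prop :=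
  active.Nodup ∧ ∀ l : Nat, l ∈ active ↔ (1 ≤ l ∧ l < pat.length ∧ pat.take l <:+ text.take t)

lemma pv_suffix_snoc (xs ys : List Char) (a b : Char) :
    (ys ++ [a]) <:+ (xs ++ [b]) ↔ a = b ∧ ys <:+ xs := by
  rw [← List.reverse_prefix]
  simp only [List.reverse_append, List.reverse_singleton, List.singleton_append,
    List.cons_prefix_cons, List.reverse_prefix]

-- occurrence at j ↔ the pattern is a suffix of the first j+m characters
lemma pv_hit_iff_suffix_take (text pat : List Char) (j : Nat)
    (hj : j + pat.length ≤ text.length) :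
    pat <+: text.drop j ↔ pat <:+ text.take (j + pat.length) := by
  rw [List.take_add]
  constructor
  · intro hp
    have : pat = (text.drop j).take pat.length := List.prefix_iff_eq_take.mp hp
    exact this ▸ List.suffix_append _ _
  · intro hs
    have hl1 : (text.take j).length = j := by rw [List.length_take]; omega
    have hlapp : (text.take j ++ (text.drop j).take pat.length).length = j + pat.length := by
      rw [List.length_append, List.length_take, List.length_take, List.length_drop]; omega
    have h2 := List.suffix_iff_eq_drop.mp hs
    rw [hlapp] at h2
    have h3 : j + pat.length - pat.length = (text.take j).length := by omega
    rw [h3, List.drop_left] at h2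
    exact h2 ▸ List.take_prefix _ _

-- splitting the occurrence list at time t: everything later comes after
lemma pv_hits_prefix (text pat : List Char) (t : Nat) (ht : t ≤ text.length) :
    ∃ tl, pvHits text pat text.length = pvHits text pat t ++ tl := by
  refine ⟨(List.range' (t + 1 - pat.length)
      ((text.length + 1 - pat.length) - (t + 1 - pat.length))).filter (pvHit text pat), ?_⟩
  unfold pvHits
  rw [← List.filter_append]
  congr 1
  have h := @List.range'_append 0 (t + 1 - pat.length)
      ((text.length + 1 - pat.length) - (t + 1 - pat.length)) 1
  simp only [one_mul, Nat.zero_add] at h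
  rw [h]
  congr 1
  omega

-- one scan step: the occurrence list grows by the match ending at t+1, if any
lemma pv_hits_succ (text pat : List Char) (t : Nat) (hm : pat.length ≤ t + 1) :
    pvHits text pat (t + 1)
      = pvHits text pat t ++ (if pvHit text pat (t + 1 - pat.length) then [t + 1 - pat.length] else []) := by
  unfold pvHits
  have h1 : t + 1 + 1 - pat.length = (t + 1 - pat.length) + 1 := by omega
  rw [h1]
  have h := @List.range'_append 0 (t + 1 - pat.length) 1 1
  simp only [one_mul, Nat.zero_add, List.range'_one] at h
  rw [← h, List.filter_append]
  congr 1
  by_cases hh : pvHit text pat (t + 1 - pat.length) = true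
  · simp [hh]
  · simp [List.filter, hh]

lemma pv_hits_stall (text pat : List Char) (t : Nat) (hm : t + 1 < pat.length) :
    pvHits text pat (t + 1) = pvHits text pat t := by
  unfold pvHits
  have h1 : t + 1 + 1 - pat.length = 0 := by omega
  have h2 : t + 1 - pat.length = 0 := by omega
  rw [h1, h2]

-- the main invariant: B's scan computes the unique occurrence (or none)
lemma pv_scanB_eq (text pat : List Char) (hp : pat ≠ []) :
    ∀ (rest : List Char) (t : Nat) (active : List Nat) (found : Option Nat),
      rest = text.drop t → t ≤ text.length →
      pvActiveInv text pat active t →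
      (match found with
        | none => pvHits text pat t = []
        | some j => pvHits text pat t = [j]) →
      pvScanB pat rest t active found = pvFinal text pat := by
  intro rest
  induction rest with
  | nil =>
    intro t active found hdrop ht _ hfound
    have htn : t = text.length := by
      have := congrArg List.length hdrop
      simp only [List.length_nil, List.length_drop] at this
      omega
    subst htn
    cases found with
    | none => simp [pvScanB, pvFinal, hfound]
    | some j => simp [pvScanB, pvFinal, hfound]
  | cons c rest' ih =>
    intro t active found hdrop ht hact hfound
    have htlt : t < text.length := by
      by_contra hc
      rw [List.drop_eq_nil_of_le (by omega)] at hdrop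
      exact List.cons_ne_nil c rest' hdrop
    have hsplit : text.drop t = text[t] :: text.drop (t + 1) :=
      (List.getElem_cons_drop htlt).symm
    rw [hsplit] at hdrop
    injection hdrop with hc hrest
    -- hc : c = text[t], hrest : rest' = text.drop (t+1)
    have htake : text.take (t + 1) = text.take t ++ [c] := by
      rw [List.take_add_one, List.getElem?_eq_getElem htlt]
      simp [hc]
    obtain ⟨hnod, hmem⟩ := hact
    have hplen : 1 ≤ pat.length := List.length_pos_iff.mpr hp
    -- characterise the new length list
    set nxt : List Nat := (active.filter (fun (l : Nat) => PySem.List.pyGet? pat (Int.ofNat l) == some c)).map (fun (l : Nat) => l + 1)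
      ++ (if PySem.List.pyGet? pat 0 == some c then [1] else []) with hnxt
    have hget : ∀ (l : Nat) (hl : l < pat.length),
        ((PySem.List.pyGet? pat (Int.ofNat l) == some c) = true ↔ pat[l] = c) := by
      intro l hl
      have : (Int.ofNat l) = ((l : Nat) : Int) := rfl
      rw [this]
      simp [PySem.List.pyGet?_natCast, List.getElem?_eq_getElem hl]
    have hget0 : ((PySem.List.pyGet? pat 0 == some c) = true ↔ pat[0] = c) := by
      have := hget 0 (by omega)
      simpa using this
    have htake1 : pat.take 1 = [pat[0]] := by
      cases pat with
      | nil => exact absurd rfl hp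
      | cons a l => simp
    have htakesu : ∀ (l : Nat) (hl : l < pat.length), pat.take (l + 1) = pat.take l ++ [pat[l]] := by
      intro l hl
      rw [List.take_add_one, List.getElem?_eq_getElem hl]
      rfl
    have hmemnxt : ∀ l' : Nat, l' ∈ nxt ↔
        (1 ≤ l' ∧ l' ≤ pat.length ∧ pat.take l' <:+ text.take (t + 1)) := by
      intro l'
      rw [htake]
      constructor
      · intro hin
        rcases List.mem_append.mp hin with hin | hin
        · obtain ⟨l, hlf, hleq⟩ := List.mem_map.mp hin
          obtain ⟨hla, hlp⟩ := List.mem_filter.mp hlf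
          obtain ⟨hl1, hllt, hlsuf⟩ := (hmem l).mp hla
          have hpc : pat[l] = c := (hget l hllt).mp hlp
          subst hleq
          refine ⟨by omega, by omega, ?_⟩
          rw [htakesu l hllt, hpc]
          exact (pv_suffix_snoc _ _ _ _).mpr ⟨rfl, hlsuf⟩
        · by_cases h0 : (PySem.List.pyGet? pat 0 == some c) = true
          · rw [if_pos h0] at hin
            simp only [List.mem_singleton] at hin
            subst hin
            refine ⟨le_refl 1, hplen, ?_⟩
            rw [htake1, hget0.mp h0]
            exact (pv_suffix_snoc _ [] _ _).mpr ⟨rfl, List.nil_suffix⟩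
          · rw [if_neg h0] at hin
            exact absurd hin (List.not_mem_nil)
      · rintro ⟨h1, h2, h3⟩
        match l', h1 with
        | 1, _ =>
          rw [htake1] at h3
          have := (pv_suffix_snoc _ [] _ _).mp (by simpa using h3)
          apply List.mem_append.mpr
          right
          rw [if_pos (hget0.mpr this.1)]
          exact List.mem_singleton.mpr rfl
        | (l + 2), _ =>
          have hllt : l + 1 < pat.length := by omega
          rw [htakesu (l + 1) hllt] at h3
          obtain ⟨hpc, hsuf⟩ := (pv_suffix_snoc _ _ _ _).mp h3
          apply List.mem_append.mpr
          left
          apply List.mem_map.mpr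
          refine ⟨l + 1, List.mem_filter.mpr ⟨(hmem (l + 1)).mpr ⟨by omega, hllt, hsuf⟩,
            (hget (l + 1) hllt).mpr hpc⟩, rfl⟩
    have hnodnxt : nxt.Nodup := by
      apply List.Nodup.append
      · exact ((hnod.filter _).map (fun a b => by omega))
      · split <;> simp
      · intro x hx
        obtain ⟨l, hlf, hleq⟩ := List.mem_map.mp hx
        have hl1 : 1 ≤ l := ((hmem l).mp (List.mem_filter.mp hlf).1).1
        intro hx1
        have : x = 1 := by
          split at hx1
          · simpa using hx1
          · exact absurd hx1 (List.not_mem_nil)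
        omega
    simp only [pvScanB]
    rw [← hnxt]
    by_cases hmn : pat.length ∈ nxt
    · rw [if_pos hmn]
      obtain ⟨_, _, hpsuf⟩ := (hmemnxt pat.length).mp hmn
      rw [List.take_length] at hpsuf
      have hmle : pat.length ≤ t + 1 := by
        have := hpsuf.length_le
        rw [List.length_take] at this
        omega
      have hjm : (t + 1 - pat.length) + pat.length = t + 1 := by omega
      have hhit : pvHit text pat (t + 1 - pat.length) = true := by
        simp only [pvHit, decide_eq_true_eq]
        rw [pv_hit_iff_suffix_take text pat _ (by omega), hjm]
        exact hpsuf
      have hsucc := pv_hits_succ text pat t hmle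
      rw [hhit, if_pos rfl] at hsucc
      cases found with
      | some j =>
        -- second completed match: the occurrence list has at least two entries
        have hfnd : pvHits text pat t = [j] := hfound
        obtain ⟨tl, htl⟩ := pv_hits_prefix text pat (t + 1) (by omega)
        rw [hsucc, hfnd] at htl
        show none = pvFinal text pat
        unfold pvFinal
        rw [htl]
        rfl
      | none =>
        have hfnd : pvHits text pat t = [] := hfound
        have hsucc2 : pvHits text pat (t + 1) = [t + 1 - pat.length] := by
          rw [hsucc, hfnd, List.nil_append]
        show pvScanB pat rest' (t + 1) (nxt.erase pat.length) (some (t + 1 - pat.length))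
            = pvFinal text pat
        apply ih (t + 1) (nxt.erase pat.length) (some (t + 1 - pat.length)) hrest (by omega)
        · refine ⟨hnodnxt.erase _, fun l => ?_⟩
          rw [List.Nodup.mem_erase_iff hnodnxt, hmemnxt l]
          constructor
          · rintro ⟨hne, h1, h2, h3⟩; exact ⟨h1, by omega, h3⟩
          · rintro ⟨h1, h2, h3⟩; exact ⟨by omega, h1, by omega, h3⟩
        · exact hsucc2
    · rw [if_neg hmn]
      have hstall : pvHits text pat (t + 1) = pvHits text pat t := by
        by_cases hmle : pat.length ≤ t + 1
        · have hsucc := pv_hits_succ text pat t hmle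
          have hhit : pvHit text pat (t + 1 - pat.length) = false := by
            by_contra hcon
            have hhit' : pvHit text pat (t + 1 - pat.length) = true := by
              cases h : pvHit text pat (t + 1 - pat.length)
              · exact absurd h hcon
              · rfl
            simp only [pvHit, decide_eq_true_eq] at hhit'
            have hjm : (t + 1 - pat.length) + pat.length = t + 1 := by omega
            rw [pv_hit_iff_suffix_take text pat _ (by omega), hjm] at hhit'
            exact hmn ((hmemnxt pat.length).mpr ⟨hplen, le_refl _, List.take_length ▸ hhit'⟩)
          rw [hhit] at hsucc
          simpa using hsucc
        · exact pv_hits_stall text pat t (by omega)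
      apply ih (t + 1) nxt found hrest (by omega)
      · refine ⟨hnodnxt, fun l => ?_⟩
        rw [hmemnxt l]
        constructor
        · rintro ⟨h1, h2, h3⟩
          refine ⟨h1, ?_, h3⟩
          rcases Nat.lt_or_ge l pat.length with h | h
          · exact h
          · exfalso
            have : l = pat.length := by omega
            exact hmn (this ▸ (hmemnxt l).mpr ⟨h1, h2, h3⟩)
        · rintro ⟨h1, h2, h3⟩; exact ⟨h1, by omega, h3⟩
      · rw [hstall]; exact hfound

-- top-level form of the scan invariant
lemma pv_scanB_final (text pat : List Char) (hp : pat ≠ []) :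
    pvScanB pat text 0 [] none = pvFinal text pat := by
  apply pv_scanB_eq text pat hp text 0 [] none rfl (by omega)
  · refine ⟨List.nodup_nil, fun l => ?_⟩
    simp only [List.not_mem_nil, false_iff]
    rintro ⟨h1, _, h3⟩
    rw [List.take_zero, List.suffix_nil] at h3
    rcases List.take_eq_nil_iff.mp h3 with h | h
    · omega
    · exact hp h
  · unfold pvHits
    have : 0 + 1 - pat.length = 0 := by
      have := List.length_pos_iff.mpr hp
      omega
    rw [this]
    rfl

-- ===== lemmas about A's side (characterising its match list) =====

-- splitting a lower-bounded occurrence filter at its least element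
lemma pv_filter_range_split (L m s : Nat) (P : Nat → Bool) (hm : m < L) (hs : s ≤ m)
    (hPm : P m = true) (hmin : ∀ j, s ≤ j → j < m → P j = false) :
    (List.range L).filter (fun j => decide (s ≤ j) && P j)
      = m :: (List.range L).filter (fun j => decide (m + 1 ≤ j) && P j) := by
  have hsplit : List.range L = List.range' 0 (m+1) ++ List.range' (m+1) (L-m-1) := by
    rw [List.range_eq_range']
    have h := @List.range'_append 0 (m+1) (L-m-1) 1
    simp only [one_mul, Nat.zero_add] at h
    rw [h]
    congr 1
    omega
  have hsplit2 : List.range' 0 (m+1) = List.range' 0 m ++ [m] := by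
    have h := @List.range'_append 0 m 1 1
    simp only [one_mul, Nat.zero_add, List.range'_one] at h
    rw [h]
  rw [hsplit, hsplit2, List.filter_append, List.filter_append, List.filter_append]
  have e1 : List.filter (fun j => decide (s ≤ j) && P j) (List.range' 0 m) = [] := by
    rw [List.filter_eq_nil_iff]
    intro a ha
    have : a < m := by have := List.mem_range'_1.mp ha; omega
    by_cases h2 : s ≤ a
    · simp [hmin a h2 this]
    · simp [h2]
  have e2 : List.filter (fun j => decide (m + 1 ≤ j) && P j) (List.range' 0 m ++ [m]) = [] := by
    rw [List.filter_eq_nil_iff]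
    intro a ha
    have : a ≤ m := by
      rcases List.mem_append.mp ha with h' | h'
      · have := List.mem_range'_1.mp h'; omega
      · simp at h'; omega
    have : ¬ (m + 1 ≤ a) := by omega
    simp [this]
  have e3 : List.filter (fun j => decide (s ≤ j) && P j) [m] = [m] := by
    simp [List.filter, hs, hPm]
  have e4 : List.filter (fun j => decide (s ≤ j) && P j) (List.range' (m+1) (L-m-1))
      = List.filter (fun j => decide (m + 1 ≤ j) && P j) (List.range' (m+1) (L-m-1)) := by
    apply List.filter_congr
    intro a ha
    have := List.mem_range'_1.mp ha
    have h1 : s ≤ a := by omega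
    have h2 : m + 1 ≤ a := by omega
    simp [h1, h2]
  rw [List.filter_append] at e2
  rcases List.append_eq_nil_iff.mp e2 with ⟨e2a, e2b⟩
  rw [e1, e3, e4, List.filter_append, e2a, e2b]
  simp

-- characterisation of A's match-collecting loop: the sorted list of all occurrences ≥ start
lemma pv_matchesA_eq (text pat : List Char) (hpat : pat ≠ []) : ∀ (start : Nat),
    pvMatchesA text pat start
      = ((List.range text.length).filter
          (fun j => decide (start ≤ j) && pvHit text pat j)).map Int.ofNat := by
  intro start
  induction start using pvMatchesA.induct text pat with
  | case1 start h =>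
    rw [pvMatchesA, dif_pos h]
    symm
    rw [List.map_eq_nil_iff, List.filter_eq_nil_iff]
    intro j hj
    have hjL : j < text.length := List.mem_range.mp hj
    by_cases hsj : start ≤ j
    · have hsL : start ≤ text.length := by omega
      have hninf := (PySem.Chars.findFrom_natCast_eq_neg_one_iff text pat start hsL).mp h
      simp only [hsj, decide_true, Bool.true_and, pvHit, decide_eq_true_eq]
      intro hp
      apply hninf
      have hdd : text.drop j = (text.drop start).drop (j - start) := by
        rw [List.drop_drop]; congr 1; omega
      exact (hp.isInfix).trans (hdd ▸ (List.drop_suffix (j - start) (text.drop start)).isInfix)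
    · simp [hsj]
  | case2 start h ih =>
    have hb := pv_findFrom_bound text pat start h
    obtain ⟨hsL, hsp⟩ := hb
    have spec := PySem.Chars.findFrom_natCast_spec text pat start hsL h
    set pos := PySem.Chars.findFrom text pat (start : Int) none with hposdef
    have hppre : pat <+: text.drop pos.toNat := spec.2.1
    have hposL : pos.toNat < text.length := by
      by_contra hc
      rw [not_lt] at hc
      rw [List.drop_eq_nil_of_le hc] at hppre
      exact hpat (List.prefix_nil.mp hppre)
    rw [pvMatchesA, dif_neg h]
    rw [pv_filter_range_split text.length pos.toNat start (pvHit text pat) hposL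
        (by omega) (by simp [pvHit, hppre]) (fun j h1 h2 => by
          simp only [pvHit, decide_eq_false_iff_not]
          exact spec.2.2 j h1 h2)]
    rw [List.map_cons, ih]
    congr 1
    exact (Int.toNat_of_nonneg (by omega)).symm

-- occurrences beyond len(text) - len(pat) do not exist, so the trimmed range sees them all
lemma pv_range_trim (text pat : List Char) (hpat : pat ≠ []) :
    (List.range text.length).filter (pvHit text pat)
      = (List.range' 0 (text.length + 1 - pat.length)).filter (pvHit text pat) := by
  set L := text.length
  set r := L + 1 - pat.length with hr
  have hplen : 1 ≤ pat.length := List.length_pos_iff.mpr hpat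
  have hsplit : List.range L = List.range' 0 r ++ List.range' r (L - r) := by
    rw [List.range_eq_range']
    have h := @List.range'_append 0 r (L - r) 1
    simp only [one_mul, Nat.zero_add] at h
    rw [h]
    congr 1
    omega
  rw [hsplit, List.filter_append]
  have : (List.range' r (L - r)).filter (pvHit text pat) = [] := by
    rw [List.filter_eq_nil_iff]
    intro j hj
    have hj' := List.mem_range'_1.mp hj
    simp only [pvHit, decide_eq_true_eq]
    intro hp
    have hlen := hp.length_le
    rw [List.length_drop] at hlen
    omega
  rw [this, List.append_nil]

-- ===== VERDICT (by name: the statement is the Claim_ definition above) =====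
theorem find_hunk_position_spec : Claim_equal_find_hunk_position := by
  unfold Claim_equal_find_hunk_position Spec_find_hunk_position
  intro content context_before context_after _
  unfold find_hunk_position find_hunk_position_alt
  by_cases hg : context_before = [] ∧ context_after = []
  · simp [hg]
  · rw [if_neg hg, if_neg hg]
    set text := (PySem.Str.join "\n" content).toList with htext
    set pat := (PySem.Str.join "\n" (context_before ++ context_after)).toList with hpat
    by_cases hp : pat = []
    · simp [hp]
    · rw [if_neg hp, if_neg hp]
      have hms : pvMatchesA text pat 0
          = ((List.range' 0 (text.length + 1 - pat.length)).filter
              (pvHit text pat)).map Int.ofNat := by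
        rw [pv_matchesA_eq text pat hp 0]
        rw [List.filter_congr (fun x _ => by simp : ∀ x ∈ List.range text.length,
          (fun j => decide (0 ≤ j) && pvHit text pat j) x = pvHit text pat x)]
        rw [pv_range_trim text pat hp]
      rw [hms, pv_scanB_final text pat hp]
      unfold pvFinal pvHits
      cases hF : (List.range' 0 (text.length + 1 - pat.length)).filter (pvHit text pat) with
      | nil => simp
      | cons m t =>
        cases t with
        | nil =>
          have h0 : PySem.List.slice text (some 0) (some ((m : Nat) : Int))
              = PySem.List.slice text none (some ((m : Nat) : Int)) := by
            rw [PySem.List.slice_to text (by omega),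
              show (some (0:Int)) = some ((0:Nat):Int) from rfl, PySem.List.slice_natCast]
            simp
          simp only [List.map_cons, List.map_nil, List.length_cons, List.length_nil,
            List.headD_cons]
          rw [show (Int.ofNat m) = ((m : Nat) : Int) from rfl, h0]
          simp
        | cons b t' =>
          simp
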